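-- pv_equiv track=rewrite | github.com/anpoc/ScienceHack | src/final_prediction.py | chunk_starts
-- ===== SOURCE A (Python) =====
-- def chunk_starts(chunk_ids):
--     """
--     Returns a list of (value, index) for each new chunk start,
--     triggered when the number changes (ignoring -1s).
--
--     Parameters:
--         chunk_ids (list of int): Input list.
--
--     Returns:
--         list of tuples: (value, index) for chunk starts.
--     """
--     if not chunk_ids:
--         return []
--
--     result = []
--     current_value = chunk_ids[0] if chunk_ids[0] != -1 else None
--     result.append((current_value, 0))
--     for idx in range(1, len(chunk_ids)):
--         val = chunk_ids[idx]
--         if val == -1: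
--             continue
--         if val != current_value:
--             result.append((val, idx))
--             current_value = val
--     return result
-- ===== SOURCE B (Python) =====
-- def chunk_starts(chunk_ids):
--     # Two passes: forward-fill -1s with the last seen value (leading -1s -> None),
--     # then keep every position where the filled value changes.
--     filled = []
--     carry = None
--     for v in chunk_ids:
--         if v != -1:
--             carry = v
--         filled.append(carry)
--     return [(v, i) for i, v in enumerate(filled)
--             if i == 0 or filled[i - 1] != v]
-- ===== Notes on version B (the rewrite author's own statement) =====
-- stated objective: simpler
-- what changed: Replaces the explicit current_value/continue state machine with a forward-fill pass (each -1 becomes the last non--1 value, leading -1s become None) followed by a change-detection comprehension over the filled list.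
import Mathlib
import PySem

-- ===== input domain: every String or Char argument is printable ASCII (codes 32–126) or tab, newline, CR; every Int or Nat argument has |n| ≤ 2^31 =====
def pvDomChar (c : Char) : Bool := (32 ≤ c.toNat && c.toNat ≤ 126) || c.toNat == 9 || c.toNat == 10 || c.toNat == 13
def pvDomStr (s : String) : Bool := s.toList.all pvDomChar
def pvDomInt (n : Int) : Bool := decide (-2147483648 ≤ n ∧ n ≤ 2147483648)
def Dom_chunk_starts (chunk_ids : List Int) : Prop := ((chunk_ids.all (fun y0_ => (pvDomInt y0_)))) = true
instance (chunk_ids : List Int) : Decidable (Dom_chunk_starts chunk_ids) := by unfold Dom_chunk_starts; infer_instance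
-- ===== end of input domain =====

-- B replaces A's current_value/continue state machine by a forward-fill pass plus a
-- change-detection comprehension; same O(n) cost, simpler decomposition.

-- ===== PORT A =====
def chunk_starts (chunk_ids : List Int) : List (Option Int × Int) :=
  match chunk_ids with
  | [] => []
  | c0 :: _ =>
    let current_value : Option Int := if c0 ≠ -1 then some c0 else none
    let result : List (Option Int × Int) := [(current_value, 0)]
    ((PySem.List.pyRange 1 (PySem.List.len chunk_ids) 1).foldl
      (fun (st : List (Option Int × Int) × Option Int) idx =>
        let val := PySem.List.pyGetD chunk_ids idx 0   -- chunk_ids[idx]; idx always in range here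
        if val = -1 then st
        else if some val ≠ st.2 then (st.1 ++ [(some val, idx)], some val) else st)
      (result, current_value)).1

-- ===== PORT B =====
def chunk_starts_alt (chunk_ids : List Int) : List (Option Int × Int) :=
  let filled : List (Option Int) :=
    (chunk_ids.foldl
      (fun (st : List (Option Int) × Option Int) v =>
        let carry := if v ≠ -1 then some v else st.2
        (st.1 ++ [carry], carry))
      ([], none)).1
  (PySem.List.enumerate filled).filterMap
    (fun p =>
      if p.1 = 0 ∨ PySem.List.pyGet? filled (p.1 - 1) ≠ some p.2 then some (p.2, p.1) else none)

-- ===== PRECONDITION & SPEC =====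
def Spec_chunk_starts (chunk_ids : List Int) (out : List (Option Int × Int)) : Prop := out = chunk_starts_alt chunk_ids
instance (chunk_ids : List Int) (out : List (Option Int × Int)) : Decidable (Spec_chunk_starts chunk_ids out) := by unfold Spec_chunk_starts; infer_instance

-- ===== CLAIM (what is proved, stated in full; the proofs are below) =====
def Claim_equal_chunk_starts : Prop := ∀ (chunk_ids : List Int), Dom_chunk_starts chunk_ids → Spec_chunk_starts chunk_ids (chunk_starts chunk_ids)

-- ===== LEMMAS AND PROOFS =====

/-- The forward-filled list: each -1 replaced by the carry, which starts at `c`. -/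
def pvFill (c : Option Int) : List Int → List (Option Int)
  | [] => []
  | v :: vs => let c' := if v ≠ -1 then some v else c; c' :: pvFill c' vs

/-- Change points of an (already filled) list, previous value `prev`, next index `i`. -/
def pvChg (prev : Option Int) (i : Int) : List (Option Int) → List (Option Int × Int)
  | [] => []
  | v :: vs => (if v ≠ prev then [(v, i)] else []) ++ pvChg v (i + 1) vs

/-- A's loop, as a recursion over (index, value) pairs. -/
def pvChgA (cur : Option Int) (i : Int) : List Int → List (Option Int × Int)
  | [] => []
  | v :: vs =>
    if v = -1 then pvChgA cur (i + 1) vs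
    else if some v ≠ cur then (some v, i) :: pvChgA (some v) (i + 1) vs
    else pvChgA cur (i + 1) vs

theorem pvFill_foldl (vs : List Int) : ∀ (acc : List (Option Int)) (c : Option Int),
    (vs.foldl (fun (st : List (Option Int) × Option Int) v =>
        let carry := if v ≠ -1 then some v else st.2
        (st.1 ++ [carry], carry)) (acc, c)).1 = acc ++ pvFill c vs := by
  induction vs with
  | nil => intro acc c; simp [pvFill]
  | cons v vs ih =>
    intro acc c
    simp only [List.foldl_cons, pvFill]
    rw [ih]
    simp

theorem pvChgA_foldl (vs : List Int) :
    ∀ (s : Int) (acc : List (Option Int × Int)) (cur : Option Int),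
    ((PySem.List.enumerate vs s).foldl
      (fun (st : List (Option Int × Int) × Option Int) (p : Int × Int) =>
        if p.2 = -1 then st
        else if some p.2 ≠ st.2 then (st.1 ++ [(some p.2, p.1)], some p.2) else st)
      (acc, cur)).1 = acc ++ pvChgA cur s vs := by
  induction vs with
  | nil => intro s acc cur; simp [PySem.List.enumerate_nil, pvChgA]
  | cons v vs ih =>
    intro s acc cur
    rw [PySem.List.enumerate_cons]
    simp only [List.foldl_cons]
    by_cases h1 : v = -1
    · rw [if_pos h1, ih, pvChgA, if_pos h1]
    · by_cases h2 : some v ≠ cur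
      · rw [if_neg h1, if_pos h2, ih, pvChgA, if_neg h1, if_pos h2]
        simp
      · rw [if_neg h1, if_neg h2, ih, pvChgA, if_neg h1, if_neg h2]

theorem pvChgA_eq_pvChg_fill (vs : List Int) : ∀ (cur : Option Int) (s : Int),
    pvChgA cur s vs = pvChg cur s (pvFill cur vs) := by
  induction vs with
  | nil => intro cur s; simp [pvChgA, pvFill, pvChg]
  | cons v vs ih =>
    intro cur s
    by_cases h1 : v = -1
    · simp [pvChgA, pvFill, pvChg, h1, ih]
    · by_cases h2 : some v ≠ cur
      · simp [pvChgA, pvFill, pvChg, h1, h2, ih]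
      · rw [not_ne_iff] at h2
        subst h2
        simp [pvChgA, pvFill, pvChg, h1, ih]

/-- B's filterMap over a suffix of `filled` equals `pvChg` with the previous element. -/
theorem pvB_suffix (L : List (Option Int)) (vs : List (Option Int)) :
    ∀ (n : Nat) (prev : Option Int), L.drop n = prev :: vs →
    (PySem.List.enumerate vs ((n : Int) + 1)).filterMap
      (fun p =>
        if p.1 = 0 ∨ PySem.List.pyGet? L (p.1 - 1) ≠ some p.2 then some (p.2, p.1) else none)
      = pvChg prev ((n : Int) + 1) vs := by
  induction vs with
  | nil => intro n prev _; simp [PySem.List.enumerate_nil, pvChg]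
  | cons v vs ih =>
    intro n prev hdrop
    have hLn : L[n]? = some prev := by
      have h0 : (L.drop n)[0]? = some prev := by rw [hdrop]; rfl
      rw [List.getElem?_drop] at h0
      simpa using h0
    have hget : PySem.List.pyGet? L ((n : Int) + 1 - 1) = some prev := by
      have he : ((n : Int) + 1 - 1) = ((n : Nat) : Int) := by ring
      rw [he, PySem.List.pyGet?_natCast, hLn]
    have hdrop' : L.drop (n + 1) = v :: vs := by
      rw [← List.tail_drop, hdrop]; rfl
    rw [PySem.List.enumerate_cons, List.filterMap_cons]
    have hih := ih (n + 1) v hdrop'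
    push_cast at hih
    have harith : (n : Int) + 1 + 1 = (n : Int) + 2 := by ring
    by_cases h2 : v = prev
    · have hc : ¬ ((n : Int) + 1 = 0 ∨ PySem.List.pyGet? L ((n : Int) + 1 - 1) ≠ some v) := by
        rintro (h | h)
        · omega
        · exact h (by rw [hget, h2])
      rw [if_neg hc]
      simp [pvChg, h2, harith, hih]
    · have hc : ((n : Int) + 1 = 0 ∨ PySem.List.pyGet? L ((n : Int) + 1 - 1) ≠ some v) :=
        Or.inr (by rw [hget]; exact fun h => h2 (Option.some.inj h).symm)
      rw [if_pos hc]
      simp [pvChg, h2, harith, hih]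

/-- B computed on a nonempty input, in recursive form. -/
theorem pvB_closed (c0 : Int) (rest : List Int) :
    chunk_starts_alt (c0 :: rest) =
      (if c0 ≠ -1 then some c0 else none, 0) ::
        pvChg (if c0 ≠ -1 then some c0 else none) 1 (pvFill (if c0 ≠ -1 then some c0 else none) rest) := by
  set c0' : Option Int := if c0 ≠ -1 then some c0 else none with hc0'
  have hfill : pvFill none (c0 :: rest) = c0' :: pvFill c0' rest := by
    simp [pvFill, hc0']
  unfold chunk_starts_alt
  rw [pvFill_foldl (c0 :: rest) [] none]
  simp only [List.nil_append]
  rw [hfill, PySem.List.enumerate_cons]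
  simp only [List.filterMap_cons]
  simp only [true_or, if_true]
  have h0 : (pvFill none (c0 :: rest)).drop 0 = c0' :: pvFill c0' rest := by
    simpa using hfill
  have := pvB_suffix (pvFill none (c0 :: rest)) (pvFill c0' rest) 0 c0' h0
  simp only [Nat.cast_zero, zero_add] at this
  rw [hfill] at this
  simp only [zero_add]
  exact congrArg (List.cons (c0', 0)) this

/-- A computed on a nonempty input, in recursive form. -/
theorem pvA_closed (c0 : Int) (rest : List Int) :
    chunk_starts (c0 :: rest) =
      (if c0 ≠ -1 then some c0 else none, 0) ::
        pvChgA (if c0 ≠ -1 then some c0 else none) 1 rest := by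
  set c0' : Option Int := if c0 ≠ -1 then some c0 else none with hc0'
  have hlen : (0 : Int) < PySem.List.len (c0 :: rest) := by
    simp [PySem.List.len_eq]
  have henum : PySem.List.enumerate rest 1 =
      (PySem.List.pyRange 1 (PySem.List.len (c0 :: rest)) 1).map
        (fun j => (j, PySem.List.pyGetD (c0 :: rest) j 0)) := by
    have h1 := PySem.List.enumerate_eq_map_pyRange (c0 :: rest) (d := 0)
    rw [PySem.List.pyRange_one_cons hlen, PySem.List.enumerate_cons] at h1
    simp only [List.map_cons, List.cons.injEq] at h1
    have h2 := h1.2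
    norm_num at h2 ⊢
    exact h2
  have hfold : List.foldl
      (fun (st : List (Option Int × Int) × Option Int) (idx : Int) =>
        let val := PySem.List.pyGetD (c0 :: rest) idx 0
        if val = -1 then st
        else if some val ≠ st.2 then (st.1 ++ [(some val, idx)], some val) else st)
      ([(c0', 0)], c0')
      (PySem.List.pyRange 1 (PySem.List.len (c0 :: rest)) 1)
    = List.foldl
      (fun (st : List (Option Int × Int) × Option Int) (p : Int × Int) =>
        if p.2 = -1 then st
        else if some p.2 ≠ st.2 then (st.1 ++ [(some p.2, p.1)], some p.2) else st)
      ([(c0', 0)], c0') (PySem.List.enumerate rest 1) := by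
    rw [henum, List.foldl_map]
  show (List.foldl
      (fun (st : List (Option Int × Int) × Option Int) (idx : Int) =>
        let val := PySem.List.pyGetD (c0 :: rest) idx 0
        if val = -1 then st
        else if some val ≠ st.2 then (st.1 ++ [(some val, idx)], some val) else st)
      ([(c0', 0)], c0')
      (PySem.List.pyRange 1 (PySem.List.len (c0 :: rest)) 1)).1 = _
  rw [hfold, pvChgA_foldl rest 1 [(c0', 0)] c0']
  simp

-- ===== VERDICT (by name: the statement is the Claim_ definition above) =====
theorem chunk_starts_spec : Claim_equal_chunk_starts := by
  intro chunk_ids _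
  unfold Spec_chunk_starts
  match chunk_ids with
  | [] => rfl
  | c0 :: rest =>
    rw [pvA_closed, pvB_closed, pvChgA_eq_pvChg_fill]
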